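-- pv_equiv track=rewrite | github.com/FranGozze/bingo | src/bingo.py | no_mas_de_2_celdas_juntas
-- ===== SOURCE A (Python) =====
-- def no_mas_de_2_celdas_juntas(mi_carton):
--
--     for fila in mi_carton:
--         contador = 0
--         for celda in fila:
--             if celda > 0 :
--                 contador += 1
--             else:
--                 contador = 0
--             if contador == 3 :
--                 return False
--
--     return True
-- ===== SOURCE B (Python) =====
-- def no_mas_de_2_celdas_juntas(mi_carton):
--     for fila in mi_carton:
--         i = 0
--         n = len(fila)
--         while i < n:
--             j = i
--             while j < n and (fila[j] > 0) == (fila[i] > 0):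
--                 j += 1
--             if fila[i] > 0 and j - i >= 3:
--                 return False
--             i = j
--     return True
-- ===== Notes on version B (the rewrite author's own statement) =====
-- stated objective: alternative
-- what changed: B scans each row as maximal same-sign runs with a two-pointer loop and rejects a positive run of length >= 3, instead of A's resetting running counter per cell.
import Mathlib
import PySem

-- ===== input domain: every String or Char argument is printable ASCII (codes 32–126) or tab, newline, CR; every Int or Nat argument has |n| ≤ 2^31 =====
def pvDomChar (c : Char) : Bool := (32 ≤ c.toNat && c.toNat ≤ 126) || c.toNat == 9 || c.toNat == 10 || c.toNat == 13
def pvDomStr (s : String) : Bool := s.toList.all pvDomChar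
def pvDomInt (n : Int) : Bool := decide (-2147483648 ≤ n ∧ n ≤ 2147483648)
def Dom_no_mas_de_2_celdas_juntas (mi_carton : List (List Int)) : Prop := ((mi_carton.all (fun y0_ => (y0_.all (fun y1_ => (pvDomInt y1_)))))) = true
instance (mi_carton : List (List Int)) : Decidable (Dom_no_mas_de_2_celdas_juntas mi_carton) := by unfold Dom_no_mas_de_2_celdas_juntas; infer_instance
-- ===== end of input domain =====

-- B scans each row as maximal same-sign runs (two-pointer / span style) instead of A's resetting counter; alternative decomposition, same cost.


-- ===== PORT A =====
-- A's inner loop over a row with current counter `contador`; returns true iff the counter reaches 3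
def pvRowHit : List Int → Int → Bool
  | [], _ => false
  | c :: cs, contador =>
    let contador' := if c > 0 then contador + 1 else 0
    if contador' = 3 then true else pvRowHit cs contador'

def no_mas_de_2_celdas_juntas : List (List Int) → Bool
  | [] => true
  | fila :: rest => if pvRowHit fila 0 then false else no_mas_de_2_celdas_juntas rest

-- ===== PORT B =====
-- B's inner while-loops: take the maximal run with the same sign-key as the head, check it, continue on the rest
def pvRowOk : List Int → Bool
  | [] => true
  | c :: cs =>
    let k : Bool := decide (c > 0)
    let run := cs.takeWhile (fun x => decide (x > 0) == k)
    let rest := cs.dropWhile (fun x => decide (x > 0) == k)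
    if k && decide (3 ≤ run.length + 1) then false else pvRowOk rest
termination_by l => l.length
decreasing_by
  exact Nat.lt_succ_of_le (List.length_dropWhile_le _ _)

def no_mas_de_2_celdas_juntas_alt : List (List Int) → Bool
  | [] => true
  | fila :: rest => if pvRowOk fila then no_mas_de_2_celdas_juntas_alt rest else false

-- ===== PRECONDITION & SPEC =====
def Spec_no_mas_de_2_celdas_juntas (mi_carton : List (List Int)) (out : Bool) : Prop := out = no_mas_de_2_celdas_juntas_alt mi_carton
instance (mi_carton : List (List Int)) (out : Bool) : Decidable (Spec_no_mas_de_2_celdas_juntas mi_carton out) := by unfold Spec_no_mas_de_2_celdas_juntas; infer_instance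

-- ===== CLAIM (what is proved, stated in full; the proofs are below) =====
def Claim_equal_no_mas_de_2_celdas_juntas : Prop := ∀ (mi_carton : List (List Int)), Dom_no_mas_de_2_celdas_juntas mi_carton → Spec_no_mas_de_2_celdas_juntas mi_carton (no_mas_de_2_celdas_juntas mi_carton)

-- ===== LEMMAS AND PROOFS =====

-- a non-positive cell resets A's counter regardless of its current value
theorem pvRowHit_nonpos (c : Int) (cs : List Int) (k : Int) (h : ¬ c > 0) :
    pvRowHit (c :: cs) k = pvRowHit cs 0 := by
  simp [pvRowHit, h]

-- skipping a non-positive prefix leaves A's row check (at counter 0) unchanged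
theorem pvRowHit_skip (pre rest : List Int) (h : ∀ x ∈ pre, ¬ x > 0) :
    pvRowHit (pre ++ rest) 0 = pvRowHit rest 0 := by
  induction pre with
  | nil => rfl
  | cons c t ih =>
    rw [List.cons_append, pvRowHit_nonpos c (t ++ rest) 0 (h c (by simp))]
    exact ih (fun x hx => h x (by simp [hx]))

-- at the start of `rest` (empty or non-positive head) the incoming counter is irrelevant
theorem pvRowHit_reset (rest : List Int) (k : Int)
    (h : rest = [] ∨ ∃ d t, rest = d :: t ∧ ¬ d > 0) :
    pvRowHit rest k = pvRowHit rest 0 := by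
  rcases h with h | ⟨d, t, rfl, hd⟩
  · simp [h, pvRowHit]
  · rw [pvRowHit_nonpos d t k hd, pvRowHit_nonpos d t 0 hd]

-- running A's counter through a positive run of length n from counter k (0 ≤ k ≤ 2)
theorem pvRowHit_pos (pre : List Int) : ∀ (rest : List Int) (k : Int),
    (∀ x ∈ pre, x > 0) → 0 ≤ k → k ≤ 2 →
    pvRowHit (pre ++ rest) k =
      (if 3 ≤ k + pre.length then true else pvRowHit rest (k + pre.length)) := by
  induction pre with
  | nil => intro rest k _ h0 h2; simp; omega
  | cons c t ih =>
    intro rest k hpos h0 h2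
    have hc : c > 0 := hpos c (by simp)
    by_cases h3 : k + 1 = 3
    · simp [pvRowHit, hc, h3]; omega
    · have hrec := ih rest (k + 1) (fun x hx => hpos x (by simp [hx])) (by omega) (by omega)
      rw [List.cons_append,
        show pvRowHit (c :: (t ++ rest)) k = if k + 1 = 3 then true else pvRowHit (t ++ rest) (k + 1) from by
          simp [pvRowHit, hc],
        if_neg h3, hrec,
        show k + 1 + (t.length : Int) = k + ((c :: t).length : Int) from by
          simp [List.length_cons]; ring]

-- key row lemma: B's run-scan accepts a row iff A's counter never reaches 3
theorem pvRow_eq_aux : ∀ (n : Nat) (fila : List Int), fila.length ≤ n →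
    pvRowOk fila = ! pvRowHit fila 0 := by
  intro n
  induction n with
  | zero =>
    intro fila h
    have : fila = [] := by cases fila <;> simp_all
    subst this; simp [pvRowOk, pvRowHit]
  | succ n ih =>
    intro fila hlen
    match fila with
    | [] => simp [pvRowOk, pvRowHit]
    | c :: cs =>
      simp only [pvRowOk]
      set run := cs.takeWhile (fun x => decide (x > 0) == decide (c > 0)) with hrun
      set rest := cs.dropWhile (fun x => decide (x > 0) == decide (c > 0)) with hrestdef
      have hsplit : cs = run ++ rest := (List.takeWhile_append_dropWhile ..).symm
      have ihrest : pvRowOk rest = ! pvRowHit rest 0 := by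
        apply ih
        have h1 : rest.length ≤ cs.length := by
          rw [hrestdef]; exact List.length_dropWhile_le _ cs
        simp only [List.length_cons] at hlen
        omega
      by_cases hc : c > 0
      · -- head positive: run is all-positive, rest starts non-positive (or empty)
        have hrunpos : ∀ x ∈ run, x > 0 := by
          intro x hx
          have := List.mem_takeWhile_imp hx
          simpa [hc] using this
        have hrest' : rest = [] ∨ ∃ d t, rest = d :: t ∧ ¬ d > 0 := by
          cases hr : rest with
          | nil => exact Or.inl rfl
          | cons d t =>
            refine Or.inr ⟨d, t, rfl, ?_⟩
            have := List.head?_dropWhile_not (fun x => decide (x > 0) == decide (c > 0)) cs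
            rw [← hrestdef, hr] at this
            simpa [hc] using this
        have hA : pvRowHit (c :: cs) 0 =
            (if 3 ≤ 1 + (run.length : Int) then true else pvRowHit rest 0) := by
          have h1 : pvRowHit (c :: cs) 0 = pvRowHit cs 1 := by
            simp [pvRowHit, hc]
          rw [h1, hsplit, pvRowHit_pos run rest 1 hrunpos (by omega) (by omega)]
          split_ifs with h
          · rfl
          · exact pvRowHit_reset rest _ hrest'
        by_cases hlen3 : 3 ≤ run.length + 1
        · have : (3 : Int) ≤ 1 + (run.length : Int) := by omega
          simp [hc, hlen3, hA, this]
        · have : ¬ (3 : Int) ≤ 1 + (run.length : Int) := by omega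
          simp [hc, hlen3, hA, this, ihrest]
      · -- head non-positive: run is all non-positive, skip it
        have hrunnp : ∀ x ∈ run, ¬ x > 0 := by
          intro x hx
          have := List.mem_takeWhile_imp hx
          simpa [hc] using this
        have hA : pvRowHit (c :: cs) 0 = pvRowHit rest 0 := by
          rw [pvRowHit_nonpos c cs 0 hc, hsplit, pvRowHit_skip run rest hrunnp]
        simp [hc, hA, ihrest]

theorem pvRow_eq (fila : List Int) : pvRowOk fila = ! pvRowHit fila 0 :=
  pvRow_eq_aux fila.length fila (le_refl _)

-- ===== VERDICT (by name: the statement is the Claim_ definition above) =====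
theorem no_mas_de_2_celdas_juntas_spec : Claim_equal_no_mas_de_2_celdas_juntas := by
  intro mi_carton h
  clear h
  unfold Spec_no_mas_de_2_celdas_juntas
  induction mi_carton with
  | nil => rfl
  | cons fila rest ih =>
    simp only [no_mas_de_2_celdas_juntas, no_mas_de_2_celdas_juntas_alt, pvRow_eq fila]
    cases pvRowHit fila 0 <;> simp [ih]
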